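-- pv_equiv track=rewrite | github.com/tempa37/URM_Configurator | main.py | _get_error_relays
-- ===== SOURCE A (Python) =====
-- def _get_error_relays(error_mask: int) -> set[int]:
--     relays = set()
--     for test_index in range(2):
--         test_mask = (error_mask >> (8 * test_index)) & 0xFF
--         for bit in range(8):
--             if test_mask & (1 << bit):
--                 relay_number = bit + 1
--                 relays.add(relay_number)
--     return relays
-- ===== SOURCE B (Python) =====
-- # B: precomputed 256-entry relay table built once by DP on halving; per call two lookups + ordered merge.
-- _RELAY_TABLE = [()]
-- for _value in range(1, 256):
--     _shifted = tuple(r + 1 for r in _RELAY_TABLE[_value >> 1])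
--     _RELAY_TABLE.append(((1,) + _shifted) if _value & 1 else _shifted)
--
--
-- def _get_error_relays(error_mask: int) -> set[int]:
--     relays = list(_RELAY_TABLE[error_mask & 0xFF])
--     for relay in _RELAY_TABLE[(error_mask >> 8) & 0xFF]:
--         if relay not in relays:
--             relays.append(relay)
--     return set(relays)
-- ===== Notes on version B (the rewrite author's own statement) =====
-- stated objective: alternative
-- what changed: A scans all sixteen fixed bit positions of the two bytes with shift/AND tests and set insertion; B precomputes once, by dynamic programming on halving (table[v] built from table[v>>1]), a byte-indexed table mapping each byte value to its ascending relay tuple, and a call is just two table lookups merged in order with a membership filter.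
import Mathlib
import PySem

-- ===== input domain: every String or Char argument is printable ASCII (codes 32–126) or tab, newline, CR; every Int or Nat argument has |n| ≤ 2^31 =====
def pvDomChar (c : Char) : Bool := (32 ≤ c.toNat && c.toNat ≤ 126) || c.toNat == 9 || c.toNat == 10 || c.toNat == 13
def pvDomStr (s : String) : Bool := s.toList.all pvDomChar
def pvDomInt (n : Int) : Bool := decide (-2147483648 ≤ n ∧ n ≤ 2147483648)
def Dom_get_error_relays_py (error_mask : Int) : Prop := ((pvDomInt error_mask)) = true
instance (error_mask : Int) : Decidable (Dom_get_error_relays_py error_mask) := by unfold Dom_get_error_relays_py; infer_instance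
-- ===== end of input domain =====

-- B replaces A's sixteen fixed shift/AND bit tests by a 256-entry relay table built once by DP on
-- halving (table[v] from table[v>>1]); a call is two lookups merged in order (objective: alternative).

-- ===== PORT A =====
-- the inner 'for bit in range(8)' loop of A; truthiness of 'test_mask & (1 << bit)' is ≠ 0;
-- the shift amount 'bit' is a range(8) element, hence nonneg, so '.toNat' is exact here
def innerA (test_mask : Int) (relays : List Int) : List Int :=
  (PySem.List.pyRange 0 8 1).foldl
    (fun r bit => if PySem.Int.band test_mask (Int.shiftLeft 1 bit.toNat) ≠ 0 then PySem.Set.add r (bit + 1) else r)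
    relays

def get_error_relays_py (error_mask : Int) : List Int :=
  -- for test_index in range(2): test_mask = (error_mask >> (8*test_index)) & 0xFF; inner loop
  -- (8*test_index is a range(2) multiple, hence nonneg: '.toNat' shift count is exact)
  (PySem.List.pyRange 0 2 1).foldl
    (fun relays test_index => innerA (PySem.Int.band (Int.shiftRight error_mask (8 * test_index).toNat) 0xFF) relays)
    PySem.Set.empty

-- ===== PORT B =====
-- module-level '_RELAY_TABLE = [()]' then 'for _value in range(1, 256): …append(…)';
-- the index '_value >> 1' is in [0, 128) < len(table), so pyGetD's default is never taken
def relayTable : List (List Int) :=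
  (PySem.List.pyRange 1 256 1).foldl
    (fun tbl value =>
      let shifted := (PySem.List.pyGetD tbl (Int.shiftRight value 1) []).map (· + 1)
      tbl ++ [if PySem.Int.band value 1 ≠ 0 then 1 :: shifted else shifted])
    [[]]

def get_error_relays_py_alt (error_mask : Int) : List Int :=
  -- relays = list(table[mask & 0xFF]); for relay in table[(mask >> 8) & 0xFF]: append if not in;
  -- both indices are byte values in [0, 256) = len(table), so pyGetD's default is never taken
  let relays := PySem.List.pyGetD relayTable (PySem.Int.band error_mask 0xFF) []
  let relays := (PySem.List.pyGetD relayTable (PySem.Int.band (Int.shiftRight error_mask 8) 0xFF) []).foldl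
      (fun out relay => if relay ∉ out then out ++ [relay] else out) relays
  PySem.Set.ofList relays

-- ===== PRECONDITION & SPEC =====
def Spec_get_error_relays_py (error_mask : Int) (out : List Int) : Prop := out = get_error_relays_py_alt error_mask
instance (error_mask : Int) (out : List Int) : Decidable (Spec_get_error_relays_py error_mask out) := by unfold Spec_get_error_relays_py; infer_instance

-- ===== CLAIM (what is proved, stated in full; the proofs are below) =====
def Claim_equal_get_error_relays_py : Prop := ∀ (error_mask : Int), Dom_get_error_relays_py error_mask → Spec_get_error_relays_py error_mask (get_error_relays_py error_mask)

-- ===== LEMMAS AND PROOFS =====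

-- the ascending relay list of a byte value, as a specification term
def bitsList (x : Nat) : List Int :=
  ((List.range 8).filter (fun b => x.testBit b)).map (fun (b : Nat) => ((b : Int) + 1))

-- a byte-masked value is in [0, 256)
theorem band255_bounds (a : Int) : 0 ≤ PySem.Int.band a 255 ∧ PySem.Int.band a 255 < 256 := by
  unfold PySem.Int.band
  have h2 := Nat.and_le_right (n := a.toNat) (m := 255)
  split_ifs with h1 <;> simp_all <;> omega

-- the table realises bitsList on every byte value
set_option maxRecDepth 100000 in
set_option maxHeartbeats 4000000 in
theorem table_spec : ∀ v : Fin 256, PySem.List.pyGetD relayTable (v : Int) [] = bitsList v := by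
  decide

-- A's inner fold lemma
theorem fold_set_add (P : Int → Prop) [DecidablePred P] :
    ∀ (bs : List Int) (r : List Int), bs.Nodup →
      bs.foldl (fun r b => if P b then PySem.Set.add r (b + 1) else r) r
        = r ++ ((bs.filter (fun b => decide (P b ∧ (b + 1) ∉ r))).map (fun b => b + 1)) := by
  intro bs
  induction bs with
  | nil => simp
  | cons b bs ih =>
    intro r hnd
    have hnd' := hnd.of_cons
    simp only [List.foldl_cons, List.filter_cons]
    by_cases hP : P b
    · by_cases hm : (b + 1) ∈ r
      · rw [if_pos hP, PySem.Set.add_of_mem hm]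
        have : decide (P b ∧ (b + 1) ∉ r) = false := by simp [hP, hm]
        rw [this]
        exact ih r hnd'
      · rw [if_pos hP, PySem.Set.add_of_not_mem hm]
        have : decide (P b ∧ (b + 1) ∉ r) = true := by simp [hP, hm]
        rw [this]
        rw [ih (r ++ [b + 1]) hnd']
        have hfc : bs.filter (fun b' => decide (P b' ∧ (b' + 1) ∉ r ++ [b + 1]))
            = bs.filter (fun b' => decide (P b' ∧ (b' + 1) ∉ r)) := by
          apply List.filter_congr
          intro x hx
          have hne : x ≠ b := by
            rintro rfl; exact (List.nodup_cons.mp hnd).1 hx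
          simp [List.mem_append, hne]
        rw [hfc]; simp
    · rw [if_neg hP]
      have : decide (P b ∧ (b + 1) ∉ r) = false := by simp [hP]
      rw [this]
      exact ih r hnd'

-- B's merge fold lemma
theorem merge_fold :
    ∀ (l r : List Int), l.Nodup →
      l.foldl (fun out x => if x ∉ out then out ++ [x] else out) r
        = r ++ l.filter (fun x => x ∉ r) := by
  intro l
  induction l with
  | nil => simp
  | cons x l ih =>
    intro r hnd
    have hnd' := hnd.of_cons
    simp only [List.foldl_cons, List.filter_cons]
    by_cases hm : x ∈ r
    · rw [if_neg (by simp [hm])]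
      have : decide (x ∉ r) = false := by simp [hm]
      rw [this]
      exact ih r hnd'
    · rw [if_pos (by simp [hm])]
      have : decide (x ∉ r) = true := by simp [hm]
      rw [this]
      rw [ih (r ++ [x]) hnd']
      have hfc : l.filter (fun y => decide (y ∉ r ++ [x])) = l.filter (fun y => decide (y ∉ r)) := by
        apply List.filter_congr
        intro y hy
        have hne : y ≠ x := by rintro rfl; exact (List.nodup_cons.mp hnd).1 hy
        simp [List.mem_append, hne]
      rw [hfc]; simp

-- band with a positive power of two reads a bit
theorem band_two_pow (h : Fin 256) (n : Nat) :
    (PySem.Int.band (h : Int) (Int.shiftLeft 1 n) ≠ 0) ↔ (h : Nat).testBit n := by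
  have h1 : (Int.shiftLeft 1 n) = ((2^n : Nat) : Int) := by
    rw [show Int.shiftLeft 1 n = (1:Int) <<< n from rfl]
    simp [Int.shiftLeft_eq]
  rw [h1, PySem.Int.band_of_nonneg (by positivity) (by positivity)]
  have h2 : ((h : Int)).toNat = (h : Nat) := by simp
  have h3 : (((2^n : Nat) : Int)).toNat = 2^n := Int.toNat_natCast _
  rw [h2, h3, Nat.and_two_pow]
  by_cases hb : (h : Nat).testBit n <;> simp [hb]

theorem pyRange8 : PySem.List.pyRange 0 8 1 = (List.range 8).map (Nat.cast : Nat → Int) := by decide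

theorem nodup8 : (PySem.List.pyRange 0 8 1).Nodup := by decide

theorem inj_succ_cast : Function.Injective (fun (b : Nat) => ((b : Int) + 1)) := by
  intro a b hab; simp at hab; omega

theorem nodup_bits (x : Nat) : (bitsList x).Nodup :=
  List.Nodup.map inj_succ_cast (List.Nodup.filter _ List.nodup_range)

-- A's inner loop on a byte value x with accumulator r
theorem innerA_eq (x : Fin 256) (r : List Int) :
    innerA (x : Int) r
      = r ++ ((List.range 8).filter
          (fun b => decide ((x : Nat).testBit b ∧ ((b : Int) + 1) ∉ r))).map (fun (b : Nat) => ((b : Int) + 1)) := by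
  unfold innerA
  rw [fold_set_add (fun b => PySem.Int.band (x : Int) (Int.shiftLeft 1 b.toNat) ≠ 0)
        (PySem.List.pyRange 0 8 1) r nodup8]
  congr 1
  rw [pyRange8, List.filter_map, List.map_map]
  have hfc : (List.range 8).filter
        ((fun b => decide (PySem.Int.band (x : Int) (Int.shiftLeft 1 b.toNat) ≠ 0 ∧ (b + 1) ∉ r)) ∘ (Nat.cast : Nat → Int))
      = (List.range 8).filter (fun b => decide ((x : Nat).testBit b ∧ ((b : Int) + 1) ∉ r)) := by
    apply List.filter_congr
    intro b _
    have htn : ((b : Int)).toNat = b := Int.toNat_natCast b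
    simp only [Function.comp_apply, htn]
    by_cases hb : (x : Nat).testBit b
    · simp [(band_two_pow x b).mpr hb, hb]
    · have : ¬ (PySem.Int.band (x : Int) (Int.shiftLeft 1 b) ≠ 0) := fun hc => hb ((band_two_pow x b).mp hc)
      simp [this, hb]
  rw [hfc]
  rfl

-- the key combination: A's two passes equal B's lookup-and-merge on bytes (l, h)
theorem key (l h : Fin 256) :
    innerA (h : Int) (innerA (l : Int) PySem.Set.empty)
      = PySem.Set.ofList
          ((bitsList h).foldl (fun out relay => if relay ∉ out then out ++ [relay] else out) (bitsList l)) := by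
  have hlo : innerA (l : Int) PySem.Set.empty = bitsList l := by
    rw [show PySem.Set.empty = ([] : List Int) from rfl, innerA_eq l []]
    unfold bitsList
    simp
  rw [hlo, innerA_eq h (bitsList l), merge_fold _ _ (nodup_bits h)]
  have hfilter : (bitsList h).filter (fun x => x ∉ bitsList l)
      = ((List.range 8).filter
          (fun b => decide ((h : Nat).testBit b ∧ ((b : Int) + 1) ∉ bitsList l))).map (fun (b : Nat) => ((b : Int) + 1)) := by
    unfold bitsList
    rw [List.filter_map, List.filter_filter]
    apply congrArg
    apply List.filter_congr
    intro b _
    simp only [Function.comp_apply]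
    by_cases hb : (h : Nat).testBit b
    · by_cases hm : ((b : Int) + 1) ∈ bitsList l
      · simp [hb, hm]
      · simp [hb, hm]
    · simp [hb]
  rw [← hfilter]
  have hnodup : (bitsList l ++ (bitsList h).filter (fun x => x ∉ bitsList l)).Nodup := by
    rw [List.nodup_append]
    refine ⟨nodup_bits l, List.Nodup.filter _ (nodup_bits h), ?_⟩
    intro x hxl y hyf hxy
    have := (List.mem_filter.mp hyf).2
    rw [← hxy] at this
    simp [hxl] at this
  rw [PySem.Set.ofList_eq_self_of_nodup _ hnodup]

-- ===== VERDICT (by name: the statement is the Claim_ definition above) =====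
theorem get_error_relays_py_spec : Claim_equal_get_error_relays_py := by
  intro mask _dom
  unfold Spec_get_error_relays_py get_error_relays_py get_error_relays_py_alt
  have hr2 : PySem.List.pyRange 0 2 1 = [0, 1] := rfl
  rw [hr2]
  simp only [List.foldl]
  have h0 : ((8 * (0:Int)).toNat) = 0 := rfl
  have h1 : ((8 * (1:Int)).toNat) = 8 := rfl
  rw [h0, h1]
  have hsz : Int.shiftRight mask 0 = mask := by
    rw [show Int.shiftRight mask 0 = mask >>> (0:Nat) from rfl, Int.shiftRight_eq_div_pow]; norm_num
  rw [hsz]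
  have hlo := band255_bounds mask
  have hhi := band255_bounds (Int.shiftRight mask 8)
  set L : Fin 256 := ⟨(PySem.Int.band mask 255).toNat, by omega⟩ with hL
  set H : Fin 256 := ⟨(PySem.Int.band (Int.shiftRight mask 8) 255).toNat, by omega⟩ with hH
  have hLe : PySem.Int.band mask 255 = (L : Int) := by simp [hL, Int.toNat_of_nonneg hlo.1]
  have hHe : PySem.Int.band (Int.shiftRight mask 8) 255 = (H : Int) := by simp [hH, Int.toNat_of_nonneg hhi.1]
  have hkey := key L H
  have htL := table_spec L
  have htH := table_spec H
  show innerA (PySem.Int.band (Int.shiftRight mask 8) 255) (innerA (PySem.Int.band mask 255) PySem.Set.empty) = _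
  rw [hLe, hHe, hkey, htL, htH]
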